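-- pv_equiv track=rewrite | github.com/Koenic/rsdrops | bosses.py | stateToIndex
-- ===== SOURCE A (Python) =====
-- def stateToIndex(state, drops):
--     shape = [d + 1 for d in drops.values()]
--     index = 0
--     size = 1
--     for dimSize, dim in zip(shape, state):
--         index += size * dim
--         size *= dimSize
--
--     return index
-- ===== SOURCE B (Python) =====
-- def stateToIndex(state, drops):
--     dims = list(drops.values())
--     index = 0
--     for i in range(min(len(dims), len(state)) - 1, -1, -1):
--         index = index * (dims[i] + 1) + state[i]
--     return index
-- ===== Notes on version B (the rewrite author's own statement) =====
-- stated objective: alternative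
-- what changed: Replaces A's forward scan over a zipped shape list carrying a running size product by a reverse index loop over the shorter length that evaluates the mixed-radix value with Horner's rule (index = index*(dims[i]+1)+state[i]), with no shape list and no multiplier.
import Mathlib
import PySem

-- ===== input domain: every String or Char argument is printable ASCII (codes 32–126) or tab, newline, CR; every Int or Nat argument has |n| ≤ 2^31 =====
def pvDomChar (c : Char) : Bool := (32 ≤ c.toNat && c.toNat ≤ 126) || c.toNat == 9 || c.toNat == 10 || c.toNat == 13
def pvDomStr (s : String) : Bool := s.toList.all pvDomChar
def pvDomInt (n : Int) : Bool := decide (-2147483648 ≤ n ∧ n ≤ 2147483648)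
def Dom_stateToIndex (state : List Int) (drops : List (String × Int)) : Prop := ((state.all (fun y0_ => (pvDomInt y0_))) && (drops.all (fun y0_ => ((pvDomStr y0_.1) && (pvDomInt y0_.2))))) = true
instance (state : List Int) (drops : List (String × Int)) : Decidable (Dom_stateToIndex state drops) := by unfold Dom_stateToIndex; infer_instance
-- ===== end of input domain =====

-- B replaces A's forward loop (zipped shape list + running size product) by a reverse index loop evaluating the mixed-radix value with Horner's rule; alternative decomposition, same cost.

-- ===== PORT A =====
def stateToIndex (state : List Int) (drops : List (String × Int)) : Int :=
  let shape := ((PySem.Dict.ofList drops).values).map (fun d => d + 1)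
  let r := (shape.zip state).foldl
    (fun (acc : Int × Int) (p : Int × Int) => (acc.1 + acc.2 * p.2, acc.2 * p.1)) (0, 1)
  r.1

-- ===== PORT B =====
def stateToIndex_alt (state : List Int) (drops : List (String × Int)) : Int :=
  let dims := (PySem.Dict.ofList drops).values
  let n : Int := min (dims.length : Int) (state.length : Int)
  (PySem.List.pyRange (n - 1) (-1) (-1)).foldl
    (fun index i => index * (PySem.List.pyGetD dims i 0 + 1) + PySem.List.pyGetD state i 0) 0

-- ===== PRECONDITION & SPEC =====
def Spec_stateToIndex (state : List Int) (drops : List (String × Int)) (out : Int) : Prop := out = stateToIndex_alt state drops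
instance (state : List Int) (drops : List (String × Int)) (out : Int) : Decidable (Spec_stateToIndex state drops out) := by unfold Spec_stateToIndex; infer_instance

-- ===== CLAIM (what is proved, stated in full; the proofs are below) =====
def Claim_equal_stateToIndex : Prop := ∀ (state : List Int) (drops : List (String × Int)), Dom_stateToIndex state drops → Spec_stateToIndex state drops (stateToIndex state drops)

-- ===== LEMMAS AND PROOFS =====

-- common reference value: the Horner/mixed-radix number of the two lists (proof-only helper)
def pvHorner : List Int → List Int → Int
  | [], _ => 0
  | _ :: _, [] => 0
  | d :: ds, s :: ss => s + (d + 1) * pvHorner ds ss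

theorem pvA_eq_horner (dims ss : List Int) (i s : Int) :
    (((dims.map (fun d => d + 1)).zip ss).foldl
      (fun (acc : Int × Int) (p : Int × Int) => (acc.1 + acc.2 * p.2, acc.2 * p.1)) (i, s)).1
      = i + s * pvHorner dims ss := by
  induction dims generalizing ss i s with
  | nil => simp [pvHorner]
  | cons d ds ih =>
    cases ss with
    | nil => simp [pvHorner]
    | cons x xs =>
      simp only [List.map_cons, List.zip_cons_cons, List.foldl_cons, ih, pvHorner]
      ring

theorem pvB_foldr_eq_horner (dims ss : List Int) :
    (List.range (min dims.length ss.length)).foldr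
      (fun k index => index * (dims.getD k 0 + 1) + ss.getD k 0) 0 = pvHorner dims ss := by
  induction dims generalizing ss with
  | nil => simp [pvHorner]
  | cons d ds ih =>
    cases ss with
    | nil => simp [pvHorner]
    | cons x xs =>
      have hmin : min (d :: ds).length (x :: xs).length = min ds.length xs.length + 1 := by
        simp [Nat.succ_min_succ]
      rw [hmin, List.range_succ_eq_map, List.foldr_cons, List.foldr_map]
      simp only [List.getD_cons_succ, List.getD_cons_zero]
      rw [ih]
      simp [pvHorner]; ring

theorem pvB_eq_horner (dims ss : List Int) :
    (PySem.List.pyRange ((min (dims.length : Int) (ss.length : Int)) - 1) (-1) (-1)).foldl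
      (fun index i => index * (PySem.List.pyGetD dims i 0 + 1) + PySem.List.pyGetD ss i 0) 0
      = pvHorner dims ss := by
  have hn : min (dims.length : Int) (ss.length : Int) = ((min dims.length ss.length : Nat) : Int) := by
    omega
  rw [hn, PySem.List.pyRange_neg_one_eq_reverse, List.foldl_reverse]
  have : PySem.List.pyRange (-1 + 1) ((min dims.length ss.length : Nat) - 1 + 1) 1
      = (List.range (min dims.length ss.length)).map (fun k => ((k : Nat) : Int)) := by
    rw [PySem.List.pyRange_one]
    have h2 : ((((min dims.length ss.length : Nat) : Int) - 1 + 1) - (-1 + 1)).toNat = min dims.length ss.length := by omega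
    rw [h2]
    apply List.map_congr_left
    intro k _
    omega
  rw [this, List.foldr_map]
  simp only [PySem.List.pyGetD_natCast]
  exact pvB_foldr_eq_horner dims ss

-- ===== VERDICT (by name: the statement is the Claim_ definition above) =====
theorem stateToIndex_spec : Claim_equal_stateToIndex := by
  intro state drops _
  unfold Spec_stateToIndex stateToIndex stateToIndex_alt
  simp only [pvA_eq_horner, pvB_eq_horner]
  ring
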